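-- pv_equiv track=rewrite | github.com/zathrath03/leetcode | 838-push-dominoes/838-push-dominoes.py | mapLeftPushes
-- ===== SOURCE A (Python) =====
-- def mapLeftPushes(dominoes: str) -> list:
--     left = [False] * len(dominoes)
--     pushedLeft = False
--     for i in reversed(range(len(dominoes))):
--         push = dominoes[i]
--         if push == 'R':
--             pushedLeft = False
--         elif pushedLeft or push =='L':
--             left[i] = True
--             pushedLeft = True
--     return left
-- ===== SOURCE B (Python) =====
-- def mapLeftPushes(dominoes: str) -> list:
--     left = []
--     pending = 0
--     for c in dominoes:
--         if c == 'L':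
--             left += [True] * (pending + 1)
--             pending = 0
--         elif c == 'R':
--             left += [False] * (pending + 1)
--             pending = 0
--         else:
--             pending += 1
--     left += [False] * pending
--     return left
-- ===== Notes on version B (the rewrite author's own statement) =====
-- stated objective: alternative
-- what changed: Replaces the reverse index pass that mutates a preallocated list under a carried flag with a forward pass that counts undecided cells and emits whole runs of booleans when a push character (or the end) resolves them.
import Mathlib
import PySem

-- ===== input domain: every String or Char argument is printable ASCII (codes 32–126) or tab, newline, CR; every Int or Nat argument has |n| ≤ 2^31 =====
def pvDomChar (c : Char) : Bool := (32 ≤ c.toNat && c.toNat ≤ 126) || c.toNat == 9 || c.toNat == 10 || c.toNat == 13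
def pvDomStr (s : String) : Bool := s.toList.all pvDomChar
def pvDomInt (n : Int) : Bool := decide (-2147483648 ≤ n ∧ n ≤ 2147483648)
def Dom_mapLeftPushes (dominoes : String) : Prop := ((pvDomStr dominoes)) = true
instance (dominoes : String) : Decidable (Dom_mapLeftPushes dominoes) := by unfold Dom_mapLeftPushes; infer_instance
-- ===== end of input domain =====

set_option maxRecDepth 4000

-- B replaces A's reverse index pass mutating a preallocated list under a carried flag with a
-- forward pass that counts undecided cells and emits runs when a push resolves them (objective:
-- alternative; not measured faster).


-- ===== PORT A =====
-- loop body of A; `i` comes from reversed(range(len)), so it is a Nat index < chars.length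
-- and `chars.getD i ' '` is exactly Python's dominoes[i] there.
def stepA (chars : List Char) (st : List Bool × Bool) (i : Nat) : List Bool × Bool :=
  let push := chars.getD i ' '
  if push = 'R' then (st.1, false)
  else if st.2 || push = 'L' then (st.1.set i true, true)
  else st

def mapLeftPushes (dominoes : String) : List Bool :=
  let chars := dominoes.toList
  let n := chars.length
  ((List.range n).reverse.foldl (stepA chars) (List.replicate n false, false)).1

-- ===== PORT B =====
-- B's loop body: decide the pending run (and the push cell itself) when a push appears.
def stepB (st : List Bool × Nat) (c : Char) : List Bool × Nat :=
  if c = 'L' then (st.1 ++ List.replicate (st.2 + 1) true, 0)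
  else if c = 'R' then (st.1 ++ List.replicate (st.2 + 1) false, 0)
  else (st.1, st.2 + 1)

def mapLeftPushes_alt (dominoes : String) : List Bool :=
  let st := dominoes.toList.foldl stepB ([], 0)
  st.1 ++ List.replicate st.2 false

-- ===== PRECONDITION & SPEC =====
def Spec_mapLeftPushes (dominoes : String) (out : List Bool) : Prop := out = mapLeftPushes_alt dominoes
instance (dominoes : String) (out : List Bool) : Decidable (Spec_mapLeftPushes dominoes out) := by unfold Spec_mapLeftPushes; infer_instance

-- ===== CLAIM (what is proved, stated in full; the proofs are below) =====
def Claim_equal_mapLeftPushes : Prop := ∀ (dominoes : String), Dom_mapLeftPushes dominoes → Spec_mapLeftPushes dominoes (mapLeftPushes dominoes)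

-- ===== LEMMAS AND PROOFS =====

-- proof-only spec: whether the cell at the head of this suffix ends up pushed left
def pushedLeftFrom : List Char → Bool
  | [] => false
  | c :: t => if c = 'R' then false else if c = 'L' then true else pushedLeftFrom t

-- setting the element just past a prefix
lemma set_at_len (pre : List Bool) (x y : Bool) (tail : List Bool) :
    (pre ++ x :: tail).set pre.length y = pre ++ y :: tail := by
  induction pre with
  | nil => simp
  | cons a l ih => simp [ih]

lemma set_replicate_mid (i : Nat) (x y : Bool) (tail : List Bool) :
    (List.replicate i false ++ x :: tail).set i y = List.replicate i false ++ y :: tail := by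
  simpa using set_at_len (List.replicate i false) x y tail

-- invariant of A's reverse loop, processed as a foldr over range' i k
lemma loopA_inv (s : List Char) : ∀ (k i : Nat), i + k = s.length →
    List.foldr (fun j st => stepA s st j) (List.replicate s.length false, false) (List.range' i k)
      = (List.replicate i false ++ (List.range' i k).map (fun j => pushedLeftFrom (s.drop j)),
         pushedLeftFrom (s.drop i)) := by
  intro k
  induction k with
  | zero =>
    intro i hi
    simp at hi
    simp [hi, List.drop_length, pushedLeftFrom]
  | succ k ih =>
    intro i hi
    have hlt : i < s.length := by omega
    have hdrop : s.drop i = s[i] :: s.drop (i + 1) := List.drop_eq_getElem_cons hlt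
    have hget : s[i]? = some s[i] := List.getElem?_eq_getElem hlt
    have hrep : List.replicate (i + 1) (false : Bool) = List.replicate i false ++ [false] := by
      rw [List.replicate_succ']
    rw [List.range'_succ, List.foldr_cons, ih (i + 1) (by omega), List.map_cons]
    by_cases hR : s[i] = 'R'
    · simp [stepA, List.getD, hget, hR, hdrop, pushedLeftFrom, hrep]
    · by_cases hL : s[i] = 'L'
      · rw [hrep, List.append_assoc, List.singleton_append]
        simp [stepA, List.getD, hget, hL, hdrop, pushedLeftFrom]
      · by_cases hF : pushedLeftFrom (s.drop (i + 1)) = true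
        · rw [hrep, List.append_assoc, List.singleton_append]
          simp only [stepA, List.getD, hget, Option.getD_some]
          rw [if_neg hR, hF, Bool.true_or, if_pos rfl, set_replicate_mid, hdrop]
          simp [pushedLeftFrom, hR, hL, hF]
        · have hF' : pushedLeftFrom (s.drop (i + 1)) = false := by simpa using hF
          simp only [stepA, List.getD, hget, Option.getD_some]
          rw [if_neg hR, hF', Bool.false_or, if_neg (by simp [hL]), hdrop,
            List.replicate_succ', List.append_assoc, List.singleton_append]
          simp only [pushedLeftFrom, if_neg hR, if_neg hL, hF']

-- invariant of B's forward loop: decided prefix + pending run resolved by the rest of the string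
lemma loopB_inv (s : List Char) : ∀ (acc : List Bool) (p : Nat),
    (s.foldl stepB (acc, p)).1 ++ List.replicate (s.foldl stepB (acc, p)).2 false
      = acc ++ List.replicate p (pushedLeftFrom s)
          ++ (List.range s.length).map (fun i => pushedLeftFrom (s.drop i)) := by
  induction s with
  | nil => intro acc p; simp [pushedLeftFrom]
  | cons c t ih =>
    intro acc p
    rw [List.foldl_cons]
    rw [List.length_cons, List.range_succ_eq_map, List.map_cons, List.map_map]
    by_cases hL : c = 'L'
    · simp only [stepB, if_pos hL]
      rw [ih]
      simp [pushedLeftFrom, hL, List.replicate_succ', Function.comp, List.append_assoc]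
    · by_cases hR : c = 'R'
      · simp only [stepB, if_neg hL, if_pos hR]
        rw [ih]
        simp [pushedLeftFrom, hR, List.replicate_succ', Function.comp, List.append_assoc]
      · simp only [stepB, if_neg hL, if_neg hR]
        rw [ih]
        simp [pushedLeftFrom, hL, hR, List.replicate_succ', Function.comp, List.append_assoc]

-- ===== VERDICT (by name: the statement is the Claim_ definition above) =====
theorem mapLeftPushes_spec : Claim_equal_mapLeftPushes := by
  intro dominoes _
  show mapLeftPushes dominoes = mapLeftPushes_alt dominoes
  simp only [mapLeftPushes, mapLeftPushes_alt, List.foldl_reverse, List.range_eq_range']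
  rw [loopA_inv dominoes.toList dominoes.toList.length 0 (by omega)]
  have hb := loopB_inv dominoes.toList [] 0
  simp only [List.nil_append, List.replicate_zero] at hb
  simp [hb, List.range_eq_range']
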